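-- pv_equiv track=rewrite | github.com/cmin0717/Algorithm | 2023-04(백준, 프로그래머스)/크레인 인형뽑기 게임.py | solution
-- ===== SOURCE A (Python) =====
-- def solution(board, moves):
--     box = [[] for _ in range(len(board[0]))]
--     for i in board[::-1]:
--         for j in range(len(i)):
--             if i[j] != 0:
--                 box[j].append(i[j])
--     result = 0
--     check = []
--
--     for i in moves:
--         if box[i-1]:
--             check.append(box[i-1].pop())
--         else:
--             continue
--
--         while len(check) > 1:
--             if check[-1] == check[-2]:
--                 result += 2
--                 check.pop()
--                 check.pop()
--             else:
--                 break
--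
--     return result
-- ===== SOURCE B (Python) =====
-- def solution(board, moves):
--     # Pointer-based: scan each column lazily from a per-column row pointer
--     # instead of prebuilding column stacks.
--     ncols = len(board[0])
--     nrows = len(board)
--     top = [0] * ncols
--     result = 0
--     stack = []
--     for m in moves:
--         c = m - 1
--         r = top[c]
--         v = None
--         while r < nrows:
--             row = board[r]
--             r += 1
--             if c < len(row) and row[c] != 0:
--                 v = row[c]
--                 break
--         top[c] = r
--         if v is None:
--             continue
--         if stack and stack[-1] == v:
--             stack.pop()
--             result += 2
--         else:
--             stack.append(v)
--     return result
-- ===== Notes on version B (the rewrite author's own statement) =====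
-- stated objective: alternative
-- what changed: B replaces A's prebuilt per-column stacks (materialized from the reversed board) with an array of per-column row pointers that lazily scan the original board downward, and replaces A's while-loop cancellation with a single top-of-stack comparison.
-- outside the precondition, e.g. on solution([[1, 2], [2]], [0, 0]): A returns 0, B returns 2
import Mathlib
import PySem

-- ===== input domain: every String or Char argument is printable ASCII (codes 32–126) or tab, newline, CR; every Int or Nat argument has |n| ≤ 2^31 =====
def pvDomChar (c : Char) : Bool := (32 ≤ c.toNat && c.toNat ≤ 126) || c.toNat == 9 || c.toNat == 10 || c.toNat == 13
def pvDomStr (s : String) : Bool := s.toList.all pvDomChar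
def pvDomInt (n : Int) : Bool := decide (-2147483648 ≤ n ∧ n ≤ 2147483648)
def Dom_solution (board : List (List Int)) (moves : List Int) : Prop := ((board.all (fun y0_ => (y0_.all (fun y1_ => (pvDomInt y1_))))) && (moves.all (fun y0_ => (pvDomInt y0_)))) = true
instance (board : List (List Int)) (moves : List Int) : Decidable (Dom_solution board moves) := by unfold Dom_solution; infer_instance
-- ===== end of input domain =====

-- B replaces A's prebuilt per-column stacks by per-column row pointers that scan the
-- original board lazily, and A's while-loop cancellation by a single top comparison;
-- objective: alternative (same asymptotic cost, different data structure).
-- Python lists used as stacks (append/pop at the right end) are represented as Lean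
-- lists with the TOP at the HEAD (append = cons, pop = uncons); list indexing with a
-- possibly negative index is PySem.List.pyGet?/pySetD (the '.getD' default is only
-- reached where Python raises IndexError, which Pre_solution excludes).

-- ===== PORT A =====
-- box[j].append(i[j]) for each j in range(len(i)), over board[::-1]
def pushRowA (row : List Int) (box : List (List Int)) : List (List Int) :=
  (List.range row.length).foldl
    (fun bx j => if row.getD j 0 ≠ 0 then bx.set j (row.getD j 0 :: bx.getD j []) else bx) box

def buildBoxA (board : List (List Int)) : List (List Int) :=
  board.reverse.foldl (fun box row => pushRowA row box)
    (List.replicate (board.headD []).length [])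

-- the 'while len(check) > 1: if check[-1] == check[-2]: result += 2; pop; pop else break'
def whileCancelA (res : Int) (check : List Int) : Int × List Int :=
  match check with
  | a :: b :: rest => if a = b then whileCancelA (res + 2) rest else (res, a :: b :: rest)
  | _ => (res, check)

def stepA (st : Int × List Int × List (List Int)) (m : Int) : Int × List Int × List (List Int) :=
  let res := st.1
  let check := st.2.1
  let box := st.2.2
  match (PySem.List.pyGet? box (m - 1)).getD [] with   -- box[i-1] (Python index; IndexError excluded by Pre_)
  | [] => (res, check, box)                            -- 'continue'
  | v :: srest =>
      let box' := PySem.List.pySetD box (m - 1) srest  -- box[i-1].pop()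
      let p := whileCancelA res (v :: check)           -- check.append(...); while-loop
      (p.1, p.2, box')

def solution (board : List (List Int)) (moves : List Int) : Int :=
  (moves.foldl stepA (0, [], buildBoxA board)).1

-- ===== PORT B =====
-- 'while r < nrows: row = board[r]; r += 1; if c < len(row) and row[c] != 0: v = row[c]; break'
-- scanning the suffix board.drop r; returns (found value, rows consumed).
def scanColB : List (List Int) → Int → Option Int × Nat
  | [], _ => (none, 0)
  | row :: rest, c =>
      if c < (row.length : Int) ∧ (PySem.List.pyGet? row c).getD 0 ≠ 0 then
        (some ((PySem.List.pyGet? row c).getD 0), 1)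
      else
        let p := scanColB rest c
        (p.1, p.2 + 1)

def stepB (board : List (List Int)) (st : Int × List Int × List Nat) (m : Int) :
    Int × List Int × List Nat :=
  let res := st.1
  let stack := st.2.1
  let top := st.2.2
  let t := (PySem.List.pyGet? top (m - 1)).getD 0      -- top[c] (IndexError excluded by Pre_)
  let p := scanColB (board.drop t) (m - 1)
  let top' := PySem.List.pySetD top (m - 1) (t + p.2)  -- top[c] = r (also when nothing was found)
  match p.1 with
  | none => (res, stack, top')
  | some v =>
      match stack with
      | [] => (res, [v], top')
      | w :: srest => if w = v then (res + 2, srest, top') else (res, v :: w :: srest, top')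

def solution_alt (board : List (List Int)) (moves : List Int) : Int :=
  (moves.foldl (stepB board) (0, [], List.replicate (board.headD []).length 0)).1

-- ===== PRECONDITION & SPEC =====
-- Pre_ excludes exactly the inputs where Python A raises (empty board: board[0] is an
-- IndexError; a row longer than board[0]: box[j] IndexError; a move outside
-- [1-ncols, ncols]: box[i-1] IndexError), and additionally the inputs that combine a
-- non-positive move with a ragged board, a corner outside the 1-indexed game's domain
-- on which A's negative wraparound into the column stacks and B's row-wise negative
-- indexing are both accidental and legitimately differ.
def Pre_solution (board : List (List Int)) (moves : List Int) : Prop :=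
  board ≠ [] ∧ (∀ row ∈ board, row.length ≤ (board.headD []).length) ∧
    (∀ m ∈ moves, 1 - ((board.headD []).length : Int) ≤ m ∧ m ≤ ((board.headD []).length : Int)) ∧
    ((∃ m ∈ moves, m ≤ 0) → ∀ row ∈ board, row.length = (board.headD []).length)

instance (board : List (List Int)) (moves : List Int) : Decidable (Pre_solution board moves) := by
  unfold Pre_solution; infer_instance

def pvWitness_solution : List (List Int) × List Int :=
  ([[1, 0, 3], [2, 2, 3]], [1, 2, 2, 3, 3, 1])

def Spec_solution (board : List (List Int)) (moves : List Int) (out : Int) : Prop :=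
  out = solution_alt board moves
instance (board : List (List Int)) (moves : List Int) (out : Int) : Decidable (Spec_solution board moves out) := by unfold Spec_solution; infer_instance

-- ===== CLAIM (what is proved, stated in full; the proofs are below) =====
def Claim_equal_solution : Prop := ∀ (board : List (List Int)) (moves : List Int), Dom_solution board moves → Pre_solution board moves → Spec_solution board moves (solution board moves)

-- ===== LEMMAS AND PROOFS =====

-- the predicate B's scan applies to a row (Python index c, possibly negative)
def colFI (rows : List (List Int)) (c : Int) : List Int :=
  rows.filterMap (fun row =>
    if c < (row.length : Int) ∧ (PySem.List.pyGet? row c).getD 0 ≠ 0 then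
      some ((PySem.List.pyGet? row c).getD 0)
    else none)

-- the stack A prebuilds for (resolved, nonnegative) column j
def colF (rows : List (List Int)) (j : Nat) : List Int :=
  rows.filterMap (fun row => if j < row.length ∧ row.getD j 0 ≠ 0 then some (row.getD j 0) else none)

theorem pvPyGetD_nonneg {α : Type} (xs : List α) (c : Int) (h : 0 ≤ c) (d : α) :
    (PySem.List.pyGet? xs c).getD d = xs.getD c.toNat d := by
  rw [PySem.List.pyGet?_of_nonneg _ h]
  simp [List.getD_eq_getElem?_getD]

theorem pvPyGetD_neg {α : Type} (xs : List α) (c : Int) (h1 : -(xs.length : Int) ≤ c)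
    (h2 : c < 0) (d : α) :
    (PySem.List.pyGet? xs c).getD d = xs.getD ((xs.length : Int) + c).toNat d := by
  simp only [PySem.List.pyGet?, PySem.List.pyIdx?, if_neg (by omega : ¬ 0 ≤ c), if_pos h1]
  have : xs.length - (-c).toNat = ((xs.length : Int) + c).toNat := by omega
  simp [this, List.getD_eq_getElem?_getD]

theorem pvPySetD_neg {α : Type} (xs : List α) (c : Int) (h1 : -(xs.length : Int) ≤ c)
    (h2 : c < 0) (v : α) :
    PySem.List.pySetD xs c v = xs.set ((xs.length : Int) + c).toNat v := by
  simp only [PySem.List.pySetD, PySem.List.pySet?, PySem.List.pyIdx?,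
    if_neg (by omega : ¬ 0 ≤ c), if_pos h1]
  have : xs.length - (-c).toNat = ((xs.length : Int) + c).toNat := by omega
  simp [this]

theorem colFI_nonneg (rows : List (List Int)) (c : Int) (h : 0 ≤ c) :
    colFI rows c = colF rows c.toNat := by
  unfold colFI colF
  refine List.filterMap_congr (fun row _ => ?_)
  rw [pvPyGetD_nonneg row c h 0]
  exact if_congr ⟨fun ⟨a, b⟩ => ⟨by omega, b⟩, fun ⟨a, b⟩ => ⟨by omega, b⟩⟩ rfl rfl

theorem colFI_neg (n : Nat) (rows : List (List Int)) (c : Int) (h1 : -(n : Int) ≤ c)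
    (h2 : c < 0) (hrect : ∀ row ∈ rows, row.length = n) :
    colFI rows c = colF rows ((n : Int) + c).toNat := by
  unfold colFI colF
  refine List.filterMap_congr (fun row hr => ?_)
  have hlen := hrect row hr
  rw [pvPyGetD_neg row c (by omega) h2 0, hlen]
  exact if_congr ⟨fun ⟨a, b⟩ => ⟨by omega, b⟩, fun ⟨a, b⟩ => ⟨by omega, b⟩⟩ rfl rfl

theorem scanColB_fst (rows : List (List Int)) (c : Int) :
    (scanColB rows c).1 = (colFI rows c).head? := by
  induction rows with
  | nil => simp [scanColB, colFI]
  | cons row rest ih =>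
      by_cases h : c < (row.length : Int) ∧ (PySem.List.pyGet? row c).getD 0 ≠ 0
      · simp only [scanColB, colFI, List.filterMap_cons, if_pos h]
        simp
      · simp only [scanColB, colFI, List.filterMap_cons, if_neg h]
        simpa [colFI] using ih

theorem scanColB_drop (rows : List (List Int)) (c : Int) :
    colFI (rows.drop (scanColB rows c).2) c = (colFI rows c).tail := by
  induction rows with
  | nil => simp [scanColB, colFI]
  | cons row rest ih =>
      by_cases h : c < (row.length : Int) ∧ (PySem.List.pyGet? row c).getD 0 ≠ 0
      · simp only [scanColB, colFI, List.filterMap_cons, if_pos h]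
        simp
      · simp only [scanColB, colFI, List.filterMap_cons, if_neg h, List.drop_succ_cons]
        simpa [colFI] using ih

theorem whileCancelA_id (res : Int) (l : List Int) (h : List.IsChain (· ≠ ·) l) :
    whileCancelA res l = (res, l) := by
  match l with
  | [] => rfl
  | [a] => rfl
  | a :: b :: rest =>
      have hab : a ≠ b := (List.isChain_cons_cons.mp h).1
      simp [whileCancelA, hab]

-- the invariant tying A's state to B's state after any prefix of moves
def StInv (board : List (List Int)) (n : Nat)
    (sA : Int × List Int × List (List Int)) (sB : Int × List Int × List Nat) : Prop :=
  sA.1 = sB.1 ∧ sA.2.1 = sB.2.1 ∧ List.IsChain (· ≠ ·) sA.2.1 ∧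
    sA.2.2.length = n ∧ sB.2.2.length = n ∧
    ∀ c, c < n → sA.2.2.getD c [] = colF (board.drop (sB.2.2.getD c 0)) c

theorem pvGetD_set_self {α : Type} (l : List α) (i : Nat) (hi : i < l.length) (v d : α) :
    (l.set i v).getD i d = v := by
  simp [List.getD_eq_getElem?_getD, hi]

theorem pvGetD_set_ne {α : Type} (l : List α) (i j : Nat) (h : j ≠ i) (v d : α) :
    (l.set i v).getD j d = l.getD j d := by
  rw [List.getD_eq_getElem?_getD, List.getD_eq_getElem?_getD, List.getElem?_set_ne (by omega)]

theorem step_inv (board : List (List Int)) (n : Nat) (m : Int)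
    (sA : Int × List Int × List (List Int)) (sB : Int × List Int × List Nat)
    (hI : StInv board n sA sB) (h1 : 1 - (n : Int) ≤ m) (h2 : m ≤ (n : Int))
    (hrect : m ≤ 0 → ∀ row ∈ board, row.length = n) :
    StInv board n (stepA sA m) (stepB board sB m) := by
  obtain ⟨resA, checkA, boxA⟩ := sA
  obtain ⟨resB, stackB, topB⟩ := sB
  obtain ⟨hres, hstk, hch, hlA, hlB, hcol⟩ := hI
  dsimp only at hres hstk hch hlA hlB hcol
  subst hres hstk
  -- the resolved (nonnegative) column index j that both Pythons address
  obtain ⟨j, hj, hgb, hsb, hgt, hst, hcf⟩ :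
      ∃ j : Nat, j < n ∧
        (PySem.List.pyGet? boxA (m - 1)).getD [] = boxA.getD j [] ∧
        (∀ s, PySem.List.pySetD boxA (m - 1) s = boxA.set j s) ∧
        (PySem.List.pyGet? topB (m - 1)).getD 0 = topB.getD j 0 ∧
        (∀ x, PySem.List.pySetD topB (m - 1) x = topB.set j x) ∧
        (∀ t', colFI (board.drop t') (m - 1) = colF (board.drop t') j) := by
    by_cases hm : 1 ≤ m
    · exact ⟨(m - 1).toNat, by omega,
        pvPyGetD_nonneg _ _ (by omega) _,
        fun s => PySem.List.pySetD_of_nonneg _ s (by omega),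
        pvPyGetD_nonneg _ _ (by omega) _,
        fun x => PySem.List.pySetD_of_nonneg _ x (by omega),
        fun t' => colFI_nonneg _ _ (by omega)⟩
    · have hm' : m < 1 := by omega
      have hrect' := hrect (by omega)
      refine ⟨((n : Int) + (m - 1)).toNat, by omega, ?_, ?_, ?_, ?_, ?_⟩
      · rw [pvPyGetD_neg boxA (m - 1) (by omega) (by omega) _, hlA]
      · intro s; rw [pvPySetD_neg boxA (m - 1) (by omega) (by omega) s, hlA]
      · rw [pvPyGetD_neg topB (m - 1) (by omega) (by omega) _, hlB]
      · intro x; rw [pvPySetD_neg topB (m - 1) (by omega) (by omega) x, hlB]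
      · exact fun t' => colFI_neg n _ (m - 1) (by omega) (by omega)
          (fun row hr => hrect' row (List.mem_of_mem_drop hr))
  unfold stepA stepB
  dsimp only
  rw [hgb, hgt]
  simp only [hsb, hst]
  set t := topB.getD j 0 with htdef
  have hs := hcol j hj
  set k := (scanColB (board.drop t) (m - 1)).2 with hkdef
  have hfst := scanColB_fst (board.drop t) (m - 1)
  rw [hcf t] at hfst
  have hdrop := scanColB_drop (board.drop t) (m - 1)
  rw [List.drop_drop, ← hkdef, hcf, hcf] at hdrop
  have hcolsB : ∀ bx : List (List Int),
      (bx.getD j [] = colF (board.drop (t + k)) j) →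
      (∀ c', c' ≠ j → bx.getD c' [] = boxA.getD c' []) →
      ∀ c', c' < n → bx.getD c' [] = colF (board.drop ((topB.set j (t + k)).getD c' 0)) c' := by
    intro bx hcc hother c' hc'
    by_cases hcc' : c' = j
    · subst hcc'
      rw [pvGetD_set_self topB c' (by omega) _ _]
      exact hcc
    · rw [pvGetD_set_ne topB j c' hcc', hother c' hcc']
      exact hcol c' hc'
  cases hcf2 : colF (board.drop t) j with
  | nil =>
      have hp1 : (scanColB (board.drop t) (m - 1)).1 = none := by
        rw [hfst, hcf2]; rfl
      rw [hs, hcf2, hp1]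
      dsimp only
      refine ⟨rfl, rfl, hch, hlA, by simp [hlB], ?_⟩
      refine hcolsB boxA ?_ (fun _ _ => rfl)
      rw [hs, hcf2, hdrop, hcf2]
      rfl
  | cons v srest =>
      have hp1 : (scanColB (board.drop t) (m - 1)).1 = some v := by
        rw [hfst, hcf2]; rfl
      rw [hs, hcf2, hp1]
      dsimp only
      have hccol : (boxA.set j srest).getD j [] = colF (board.drop (t + k)) j := by
        rw [pvGetD_set_self boxA j (by omega) _ _, hdrop, hcf2]
        rfl
      have hcother : ∀ c', c' ≠ j → (boxA.set j srest).getD c' [] = boxA.getD c' [] :=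
        fun c' h => pvGetD_set_ne boxA j c' h _ _
      cases checkA with
      | nil =>
          rw [whileCancelA_id resA [v] (by simp)]
          exact ⟨rfl, rfl, by simp, by simp [hlA], by simp [hlB], hcolsB _ hccol hcother⟩
      | cons w rest =>
          by_cases hvw : v = w
          · subst hvw
            have hrest : List.IsChain (· ≠ ·) rest := by
              cases rest with
              | nil => simp
              | cons x xs => exact (List.isChain_cons_cons.mp hch).2
            simp only [whileCancelA, whileCancelA_id _ _ hrest]
            exact ⟨rfl, rfl, hrest, by simp [hlA], by simp [hlB], hcolsB _ hccol hcother⟩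
          · have hwv : ¬ w = v := fun h => hvw h.symm
            simp only [whileCancelA, if_neg hvw, if_neg hwv]
            refine ⟨rfl, rfl, List.isChain_cons_cons.mpr ⟨hvw, hch⟩, by simp [hlA],
              by simp [hlB], hcolsB _ hccol hcother⟩

theorem colF_cons (row : List Int) (rows : List (List Int)) (c : Nat) :
    colF (row :: rows) c =
      if c < row.length ∧ row.getD c 0 ≠ 0 then row.getD c 0 :: colF rows c else colF rows c := by
  by_cases h : c < row.length ∧ row.getD c 0 ≠ 0
  · simp only [colF, List.filterMap_cons, if_pos h]
  · simp only [colF, List.filterMap_cons, if_neg h]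

theorem pushRowA_aux (row : List Int) (k : Nat) (box : List (List Int))
    (hk : k ≤ row.length) (hlen : row.length ≤ box.length) :
    ((List.range k).foldl
        (fun bx j => if row.getD j 0 ≠ 0 then bx.set j (row.getD j 0 :: bx.getD j []) else bx)
        box).length = box.length ∧
      ∀ c, ((List.range k).foldl
        (fun bx j => if row.getD j 0 ≠ 0 then bx.set j (row.getD j 0 :: bx.getD j []) else bx)
        box).getD c [] =
          if c < k ∧ row.getD c 0 ≠ 0 then row.getD c 0 :: box.getD c [] else box.getD c [] := by
  induction k with
  | zero => simp
  | succ k ih =>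
      obtain ⟨ihlen, ihD⟩ := ih (by omega)
      rw [List.range_succ, List.foldl_append, List.foldl_cons, List.foldl_nil]
      by_cases hz : row.getD k 0 ≠ 0
      · rw [if_pos hz]
        refine ⟨by rw [List.length_set, ihlen], ?_⟩
        intro c
        by_cases hck : c = k
        · subst hck
          rw [pvGetD_set_self _ c (by omega) _ _, ihD c, if_neg (by omega),
            if_pos ⟨by omega, hz⟩]
        · rw [pvGetD_set_ne _ k c hck _ _, ihD c]
          by_cases hcz : c < k ∧ row.getD c 0 ≠ 0
          · rw [if_pos hcz, if_pos ⟨by omega, hcz.2⟩]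
          · rw [if_neg hcz, if_neg (fun h2 => hcz ⟨by omega, h2.2⟩)]
      · rw [if_neg hz]
        refine ⟨ihlen, fun c => ?_⟩
        rw [ihD c]
        by_cases hck : c = k
        · subst hck
          rw [if_neg (by omega), if_neg (fun h2 => hz h2.2)]
        · by_cases hcz : c < k ∧ row.getD c 0 ≠ 0
          · rw [if_pos hcz, if_pos ⟨by omega, hcz.2⟩]
          · rw [if_neg hcz, if_neg (fun h2 => hcz ⟨by omega, h2.2⟩)]

theorem buildBoxA_aux (n : Nat) (rows : List (List Int))
    (hrows : ∀ row ∈ rows, row.length ≤ n) :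
    (rows.reverse.foldl (fun box row => pushRowA row box) (List.replicate n [])).length = n ∧
      ∀ c, c < n →
        (rows.reverse.foldl (fun box row => pushRowA row box)
          (List.replicate n [])).getD c [] = colF rows c := by
  induction rows with
  | nil => simp [colF]
  | cons r rs ih =>
      obtain ⟨ihlen, ihD⟩ := ih (fun row hr => hrows row (by simp [hr]))
      rw [List.reverse_cons, List.foldl_append, List.foldl_cons, List.foldl_nil]
      have hr : r.length ≤
          (rs.reverse.foldl (fun box row => pushRowA row box) (List.replicate n [])).length := by
        rw [ihlen]; exact hrows r (by simp)
      obtain ⟨plen, pD⟩ := pushRowA_aux r r.length _ (le_refl _) hr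
      refine ⟨by rw [pushRowA, plen, ihlen], ?_⟩
      intro c hc
      rw [pushRowA, pD c, colF_cons, ihD c hc]

theorem buildBoxA_inv (board : List (List Int))
    (hrows : ∀ row ∈ board, row.length ≤ (board.headD []).length) :
    StInv board (board.headD []).length (0, [], buildBoxA board)
      (0, [], List.replicate (board.headD []).length 0) := by
  obtain ⟨blen, bD⟩ := buildBoxA_aux (board.headD []).length board hrows
  refine ⟨rfl, rfl, by simp, blen, by simp, ?_⟩
  intro c hc
  have ht : (List.replicate (board.headD []).length (0 : Nat)).getD c 0 = 0 := by
    simp [List.getD_eq_getElem?_getD]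
  dsimp only
  rw [ht, List.drop_zero]
  exact bD c hc

theorem foldl_inv (board : List (List Int)) (n : Nat) (moves : List Int)
    (hm : ∀ m ∈ moves, 1 - (n : Int) ≤ m ∧ m ≤ (n : Int))
    (hrect : (∃ m ∈ moves, m ≤ 0) → ∀ row ∈ board, row.length = n) :
    ∀ sA sB, StInv board n sA sB →
      StInv board n (moves.foldl stepA sA) (moves.foldl (stepB board) sB) := by
  induction moves with
  | nil => intro sA sB h; exact h
  | cons m rest ih =>
      intro sA sB h
      exact ih (fun x hx => hm x (by simp [hx]))
        (fun ⟨x, hx, hx0⟩ => hrect ⟨x, by simp [hx], hx0⟩) _ _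
        (step_inv board n m sA sB h (hm m (by simp)).1 (hm m (by simp)).2
          (fun hm0 => hrect ⟨m, by simp, hm0⟩))

-- ===== VERDICT (by name: the statement is the Claim_ definition above) =====
theorem solution_spec : Claim_equal_solution := by
  intro board moves _ hpre
  obtain ⟨hne, hrows, hm, hrect⟩ := hpre
  unfold Spec_solution solution solution_alt
  exact (foldl_inv board (board.headD []).length moves hm hrect _ _
    (buildBoxA_inv board hrows)).1
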